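-- pv_equiv track=rewrite | github.com/Caver0/TFG---Fibrito | backend/app/services/diet_service.py | calculate_resolution_counters_from_meals
-- ===== SOURCE A (Python) =====
-- DEFAULT_FOOD_DATA_SOURCE = "internal"
--
-- CACHE_FOOD_DATA_SOURCE = "cache"
--
-- SPOONACULAR_FOOD_DATA_SOURCE = "spoonacular"
--
-- DIET_SOURCE_MAP = {
--     "internal_catalog": DEFAULT_FOOD_DATA_SOURCE,
--     "local_cache": CACHE_FOOD_DATA_SOURCE,
--     "spoonacular": SPOONACULAR_FOOD_DATA_SOURCE,
--     DEFAULT_FOOD_DATA_SOURCE: DEFAULT_FOOD_DATA_SOURCE,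
--     CACHE_FOOD_DATA_SOURCE: CACHE_FOOD_DATA_SOURCE,
--     SPOONACULAR_FOOD_DATA_SOURCE: SPOONACULAR_FOOD_DATA_SOURCE,
-- }
--
-- def normalize_diet_food_source(value: str | None) -> str:
--     return DIET_SOURCE_MAP.get(str(value or "").strip(), DEFAULT_FOOD_DATA_SOURCE)
--
-- def calculate_resolution_counters_from_meals(meals: list[dict]) -> dict[str, int]:
--     unique_food_codes: set[str] = set()
--     counters = {
--         "spoonacular_hits": 0,
--         "cache_hits": 0,
--         "internal_fallbacks": 0,
--         "resolved_foods_count": 0,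
--     }
--
--     for meal in meals:
--         for food in meal.get("foods", []):
--             food_code = str(food.get("food_code") or food.get("name") or "").strip()
--             if food_code:
--                 unique_food_codes.add(food_code)
--
--             source = normalize_diet_food_source(food.get("source", DEFAULT_FOOD_DATA_SOURCE))
--             if source == SPOONACULAR_FOOD_DATA_SOURCE:
--                 counters["spoonacular_hits"] += 1
--             elif source == CACHE_FOOD_DATA_SOURCE:
--                 counters["cache_hits"] += 1
--             else:
--                 counters["internal_fallbacks"] += 1
--
--     counters["resolved_foods_count"] = len(unique_food_codes)
--     return counters
-- ===== SOURCE B (Python) =====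
-- DEFAULT_FOOD_DATA_SOURCE = "internal"
-- CACHE_FOOD_DATA_SOURCE = "cache"
-- SPOONACULAR_FOOD_DATA_SOURCE = "spoonacular"
--
-- DIET_SOURCE_MAP = {
--     "internal_catalog": DEFAULT_FOOD_DATA_SOURCE,
--     "local_cache": CACHE_FOOD_DATA_SOURCE,
--     "spoonacular": SPOONACULAR_FOOD_DATA_SOURCE,
--     DEFAULT_FOOD_DATA_SOURCE: DEFAULT_FOOD_DATA_SOURCE,
--     CACHE_FOOD_DATA_SOURCE: CACHE_FOOD_DATA_SOURCE,
--     SPOONACULAR_FOOD_DATA_SOURCE: SPOONACULAR_FOOD_DATA_SOURCE,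
-- }
--
--
-- def _norm(value):
--     return DIET_SOURCE_MAP.get(str(value or "").strip(), DEFAULT_FOOD_DATA_SOURCE)
--
--
-- def _code(food):
--     return str(food.get("food_code") or food.get("name") or "").strip()
--
--
-- # A meal's contribution as an independently computed, mergeable summary:
-- # (spoonacular hits, cache hits, internal fallbacks, list of non-empty codes).
-- def _meal_summary(meal):
--     foods = meal.get("foods", [])
--     srcs = [_norm(f.get("source", DEFAULT_FOOD_DATA_SOURCE)) for f in foods]
--     codes = [c for c in (_code(f) for f in foods) if c]
--     return (srcs.count(SPOONACULAR_FOOD_DATA_SOURCE),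
--             srcs.count(CACHE_FOOD_DATA_SOURCE),
--             srcs.count(DEFAULT_FOOD_DATA_SOURCE),
--             codes)
--
--
-- def _merge(x, y):
--     return (x[0] + y[0], x[1] + y[1], x[2] + y[2], x[3] + y[3])
--
--
-- # Balanced divide-and-conquer reduction of the summaries (merge is associative
-- # with identity (0, 0, 0, []), so the combination order does not matter).
-- def _reduce_tree(summaries):
--     if not summaries:
--         return (0, 0, 0, [])
--     if len(summaries) == 1:
--         return summaries[0]
--     mid = len(summaries) // 2
--     return _merge(_reduce_tree(summaries[:mid]), _reduce_tree(summaries[mid:]))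
--
--
-- def calculate_resolution_counters_from_meals(meals: list[dict]) -> dict[str, int]:
--     sp, ca, it, codes = _reduce_tree([_meal_summary(m) for m in meals])
--     return {
--         "spoonacular_hits": sp,
--         "cache_hits": ca,
--         "internal_fallbacks": it,
--         "resolved_foods_count": len(set(codes)),
--     }
-- ===== Notes on version B (the rewrite author's own statement) =====
-- stated objective: alternative
-- what changed: Replaces A's fused nested loop mutating a counter dict by a map-reduce: each meal is mapped independently to a mergeable summary tuple (three source counts plus its list of codes), and the summaries are combined by a balanced divide-and-conquer merge tree over an associative merge; uniqueness is resolved once at the end.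
import Mathlib
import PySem

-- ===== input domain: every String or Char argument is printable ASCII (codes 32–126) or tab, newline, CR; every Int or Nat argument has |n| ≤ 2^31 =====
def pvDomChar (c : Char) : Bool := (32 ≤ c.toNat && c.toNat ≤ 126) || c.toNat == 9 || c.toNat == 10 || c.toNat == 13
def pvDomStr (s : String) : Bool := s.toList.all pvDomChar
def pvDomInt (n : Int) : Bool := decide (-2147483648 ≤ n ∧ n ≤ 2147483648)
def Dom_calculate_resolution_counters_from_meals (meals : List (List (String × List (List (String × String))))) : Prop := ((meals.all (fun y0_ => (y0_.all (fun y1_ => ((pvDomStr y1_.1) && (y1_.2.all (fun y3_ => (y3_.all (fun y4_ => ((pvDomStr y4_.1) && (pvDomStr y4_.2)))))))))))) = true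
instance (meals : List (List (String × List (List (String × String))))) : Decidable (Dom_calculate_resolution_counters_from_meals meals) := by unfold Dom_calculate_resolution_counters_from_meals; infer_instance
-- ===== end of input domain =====

-- B replaces A's fused nested loop mutating a counter dict by a map-reduce: each meal becomes a
-- mergeable summary tuple, combined by a balanced divide-and-conquer merge tree; same cost.

-- shared helpers (same-module constants/helpers both Pythons use)
def pvDietSourceMap : PySem.Dict String String := PySem.Dict.ofList
  [("internal_catalog", "internal"), ("local_cache", "cache"), ("spoonacular", "spoonacular"),
   ("internal", "internal"), ("cache", "cache"), ("spoonacular", "spoonacular")]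

-- str(value or "").strip() then DIET_SOURCE_MAP.get(…, "internal")
def normalize_diet_food_source (value : String) : String :=
  pvDietSourceMap.getD (PySem.Str.strip (if value = "" then "" else value)) "internal"

-- 'x or y' on an optional string operand (None and "" are falsy)
def pvOrStr (a : Option String) (b : String) : String :=
  match a with
  | some s => if s = "" then b else s
  | none => b

-- str(food.get("food_code") or food.get("name") or "").strip()
def pvFoodCode (food : List (String × String)) : String :=
  PySem.Str.strip (pvOrStr ((PySem.Dict.mk food).get? "food_code")
    (pvOrStr ((PySem.Dict.mk food).get? "name") ""))

-- normalize_diet_food_source(food.get("source", DEFAULT_FOOD_DATA_SOURCE))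
def pvSrc (food : List (String × String)) : String :=
  normalize_diet_food_source ((PySem.Dict.mk food).getD "source" "internal")

-- ===== PORT A =====
def calculate_resolution_counters_from_meals (meals : List (List (String × List (List (String × String))))) : List (String × Int) :=
  let init : PySem.Set String × PySem.Dict String Int :=
    (PySem.Set.empty,
     PySem.Dict.ofList [("spoonacular_hits", 0), ("cache_hits", 0), ("internal_fallbacks", 0), ("resolved_foods_count", 0)])
  let st := meals.foldl (fun st meal =>
    ((PySem.Dict.mk meal).getD "foods" []).foldl (fun st food =>
      let food_code := pvFoodCode food
      let ufc := if food_code ≠ "" then st.1.add food_code else st.1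
      let source := pvSrc food
      let counters :=
        if source = "spoonacular" then st.2.modify "spoonacular_hits" 0 (· + 1)
        else if source = "cache" then st.2.modify "cache_hits" 0 (· + 1)
        else st.2.modify "internal_fallbacks" 0 (· + 1)
      (ufc, counters)) st) init
  (st.2.insert "resolved_foods_count" (PySem.Set.len st.1 : Int)).items

-- ===== PORT B =====
-- _meal_summary: a meal's contribution as a mergeable tuple
def pvSummary (meal : List (String × List (List (String × String)))) : Int × Int × Int × List String :=
  let foods := (PySem.Dict.mk meal).getD "foods" []
  let srcs := foods.map pvSrc
  ((srcs.count "spoonacular" : Int), (srcs.count "cache" : Int), (srcs.count "internal" : Int),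
   (foods.map pvFoodCode).filter (fun c => c ≠ ""))

-- _merge
def pvMerge (x y : Int × Int × Int × List String) : Int × Int × Int × List String :=
  (x.1 + y.1, x.2.1 + y.2.1, x.2.2.1 + y.2.2.1, x.2.2.2 ++ y.2.2.2)

-- _reduce_tree: balanced divide-and-conquer reduction
def pvReduceTree (l : List (Int × Int × Int × List String)) : Int × Int × Int × List String :=
  match h : l with
  | [] => (0, 0, 0, [])
  | [s] => s
  | _ :: _ :: _ =>
    pvMerge (pvReduceTree (l.take (l.length / 2))) (pvReduceTree (l.drop (l.length / 2)))
termination_by l.length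
decreasing_by
  · simp [h]; omega
  · simp [h]; omega

def calculate_resolution_counters_from_meals_alt (meals : List (List (String × List (List (String × String))))) : List (String × Int) :=
  let r := pvReduceTree (meals.map pvSummary)
  [("spoonacular_hits", r.1), ("cache_hits", r.2.1), ("internal_fallbacks", r.2.2.1),
   ("resolved_foods_count", (PySem.Set.len (PySem.Set.ofList r.2.2.2) : Int))]

-- ===== PRECONDITION & SPEC =====
def Spec_calculate_resolution_counters_from_meals (meals : List (List (String × List (List (String × String))))) (out : List (String × Int)) : Prop := out = calculate_resolution_counters_from_meals_alt meals
instance (meals : List (List (String × List (List (String × String))))) (out : List (String × Int)) : Decidable (Spec_calculate_resolution_counters_from_meals meals out) := by unfold Spec_calculate_resolution_counters_from_meals; infer_instance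

-- ===== CLAIM (what is proved, stated in full; the proofs are below) =====
def Claim_equal_calculate_resolution_counters_from_meals : Prop := ∀ (meals : List (List (String × List (List (String × String))))), Dom_calculate_resolution_counters_from_meals meals → Spec_calculate_resolution_counters_from_meals meals (calculate_resolution_counters_from_meals meals)

-- ===== LEMMAS AND PROOFS =====

-- normalization only ever yields one of the three known sources
theorem pvNorm_cases (v : String) :
    normalize_diet_food_source v = "spoonacular" ∨ normalize_diet_food_source v = "cache" ∨
      normalize_diet_food_source v = "internal" := by
  have hd : pvDietSourceMap = PySem.Dict.mk
      [("internal_catalog", "internal"), ("local_cache", "cache"), ("spoonacular", "spoonacular"),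
       ("internal", "internal"), ("cache", "cache")] := by rfl
  unfold normalize_diet_food_source
  rw [hd]
  simp only [PySem.Dict.getD, PySem.Dict.get?_mk_cons]
  split_ifs <;> simp [PySem.Dict.get?]

-- the inner loop body of A, as a named step function
def pvStep (st : PySem.Set String × PySem.Dict String Int) (food : List (String × String)) :
    PySem.Set String × PySem.Dict String Int :=
  let food_code := pvFoodCode food
  let ufc := if food_code ≠ "" then st.1.add food_code else st.1
  let source := pvSrc food
  let counters :=
    if source = "spoonacular" then st.2.modify "spoonacular_hits" 0 (· + 1)
    else if source = "cache" then st.2.modify "cache_hits" 0 (· + 1)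
    else st.2.modify "internal_fallbacks" 0 (· + 1)
  (ufc, counters)

def pvCtr (a b c r : Int) : PySem.Dict String Int :=
  PySem.Dict.mk [("spoonacular_hits", a), ("cache_hits", b), ("internal_fallbacks", c), ("resolved_foods_count", r)]

theorem pvStep_invariant (foods : List (List (String × String))) :
    ∀ (s : PySem.Set String) (a b c r : Int),
      foods.foldl pvStep (s, pvCtr a b c r)
        = (PySem.Set.update s ((foods.map pvFoodCode).filter (fun x => x ≠ "")),
           pvCtr (a + ((foods.map pvSrc).count "spoonacular" : Int))
                 (b + ((foods.map pvSrc).count "cache" : Int))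
                 (c + ((foods.map pvSrc).count "internal" : Int)) r) := by
  induction foods with
  | nil => intro s a b c r; simp [PySem.Set.update]
  | cons f fs ih =>
    intro s a b c r
    have hmods :
        (pvCtr a b c r).modify "spoonacular_hits" 0 (· + 1) = pvCtr (a + 1) b c r ∧
        (pvCtr a b c r).modify "cache_hits" 0 (· + 1) = pvCtr a (b + 1) c r ∧
        (pvCtr a b c r).modify "internal_fallbacks" 0 (· + 1) = pvCtr a b (c + 1) r := by
      refine ⟨?_, ?_, ?_⟩ <;> rfl
    rcases pvNorm_cases ((PySem.Dict.mk f).getD "source" "internal") with h | h | h <;>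
      by_cases hc : pvFoodCode f = "" <;>
        simp [List.foldl_cons, pvStep, pvSrc, h, hc, hmods.1, hmods.2.1, hmods.2.2, ih,
          PySem.Set.update] <;>
        ring_nf

theorem nested_foldl_eq_flatMap (meals : List (List (String × List (List (String × String)))))
    (init : PySem.Set String × PySem.Dict String Int) :
    meals.foldl (fun st meal => ((PySem.Dict.mk meal).getD "foods" []).foldl pvStep st) init
      = (meals.flatMap (fun meal => (PySem.Dict.mk meal).getD "foods" [])).foldl pvStep init := by
  induction meals generalizing init with
  | nil => rfl
  | cons m ms ih => simp [List.foldl_cons, List.flatMap_cons, List.foldl_append, ih]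

theorem pvItems_insert (a b c r v : Int) :
    ((pvCtr a b c r).insert "resolved_foods_count" v).items
      = [("spoonacular_hits", a), ("cache_hits", b), ("internal_fallbacks", c), ("resolved_foods_count", v)] := rfl

-- merge is associative with identity (0,0,0,[])
theorem pvMerge_assoc (x y z : Int × Int × Int × List String) :
    pvMerge (pvMerge x y) z = pvMerge x (pvMerge y z) := by
  simp [pvMerge]; refine ⟨by ring, by ring, by ring⟩

theorem pvMerge_nil_right (x : Int × Int × Int × List String) : pvMerge x (0, 0, 0, []) = x := by
  simp [pvMerge]

theorem foldr_merge_append (a b : List (Int × Int × Int × List String)) :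
    (a ++ b).foldr pvMerge (0, 0, 0, [])
      = pvMerge (a.foldr pvMerge (0, 0, 0, [])) (b.foldr pvMerge (0, 0, 0, [])) := by
  induction a with
  | nil => simp [pvMerge]
  | cons x xs ih => simp [List.foldr_cons, ih, pvMerge_assoc]

-- the balanced tree reduction computes an ordinary right fold of pvMerge
theorem pvReduceTree_eq_foldr : ∀ n (l : List (Int × Int × Int × List String)), l.length ≤ n →
    pvReduceTree l = l.foldr pvMerge (0, 0, 0, []) := by
  intro n
  induction n with
  | zero => intro l hl; rw [List.length_eq_zero_iff.mp (Nat.le_zero.mp hl)]; simp [pvReduceTree]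
  | succ n ih =>
    intro l hl
    match l with
    | [] => simp [pvReduceTree]
    | [s] => simp [pvReduceTree, pvMerge_nil_right]
    | x :: y :: rest =>
      rw [pvReduceTree]
      rw [ih _ (by simp at *; omega), ih _ (by simp at *; omega),
        ← foldr_merge_append, List.take_append_drop]

-- the fold of the per-meal summaries is the global counts over the flattened foods
theorem foldr_summary (meals : List (List (String × List (List (String × String))))) :
    (meals.map pvSummary).foldr pvMerge (0, 0, 0, [])
      = ((((meals.flatMap (fun meal => (PySem.Dict.mk meal).getD "foods" [])).map pvSrc).count "spoonacular" : Int),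
         (((meals.flatMap (fun meal => (PySem.Dict.mk meal).getD "foods" [])).map pvSrc).count "cache" : Int),
         (((meals.flatMap (fun meal => (PySem.Dict.mk meal).getD "foods" [])).map pvSrc).count "internal" : Int),
         ((meals.flatMap (fun meal => (PySem.Dict.mk meal).getD "foods" [])).map pvFoodCode).filter (fun c => c ≠ "")) := by
  induction meals with
  | nil => rfl
  | cons m ms ih =>
    simp only [List.map_cons, List.foldr_cons, ih, List.flatMap_cons, List.map_append,
      List.count_append, List.filter_append, pvMerge, pvSummary]
    push_cast
    rfl

-- ===== VERDICT (by name: the statement is the Claim_ definition above) =====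
theorem calculate_resolution_counters_from_meals_spec : Claim_equal_calculate_resolution_counters_from_meals := by
  intro meals _
  unfold Spec_calculate_resolution_counters_from_meals
  have hA' : calculate_resolution_counters_from_meals meals
      = (fun st : PySem.Set String × PySem.Dict String Int =>
          (st.2.insert "resolved_foods_count" (PySem.Set.len st.1 : Int)).items)
        (meals.foldl (fun st meal => ((PySem.Dict.mk meal).getD "foods" []).foldl pvStep st)
          (PySem.Set.empty, pvCtr 0 0 0 0)) := rfl
  rw [hA', nested_foldl_eq_flatMap, pvStep_invariant]
  unfold calculate_resolution_counters_from_meals_alt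
  rw [pvReduceTree_eq_foldr (meals.map pvSummary).length _ le_rfl, foldr_summary]
  simp only [pvItems_insert]
  simp [PySem.Set.update, PySem.Set.ofList, PySem.Set.empty]
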